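-- pv_equiv track=rewrite | github.com/rafaeltondin/shopify-chatbot | src/utils/text_utils.py | _translate_date_parts_to_ptbr
-- ===== SOURCE A (Python) =====
-- def _translate_date_parts_to_ptbr(text: str) -> str:
--     replacements = {
--         "Monday": "Segunda-feira", "Tuesday": "Terça-feira", "Wednesday": "Quarta-feira",
--         "Thursday": "Quinta-feira", "Friday": "Sexta-feira", "Saturday": "Sábado", "Sunday": "Domingo",
--         "January": "Janeiro", "February": "Fevereiro", "March": "Março", "April": "Abril",
--         "May": "Maio", "June": "Junho", "July": "Julho", "August": "Agosto",
--         "September": "Setembro", "October": "Outubro", "November": "Novembro", "December": "Dezembro"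
--     }
--     for en, pt in replacements.items():
--         text = text.replace(en, pt)
--     return text
-- ===== SOURCE B (Python) =====
-- # first-letter dispatch table: capital letter -> (rest-of-word, translation) candidates
-- _BY_FIRST = {
--     "M": [("onday", "Segunda-feira"), ("arch", "Março"), ("ay", "Maio")],
--     "T": [("uesday", "Terça-feira"), ("hursday", "Quinta-feira")],
--     "W": [("ednesday", "Quarta-feira")],
--     "F": [("riday", "Sexta-feira"), ("ebruary", "Fevereiro")],
--     "S": [("aturday", "Sábado"), ("unday", "Domingo"), ("eptember", "Setembro")],
--     "J": [("anuary", "Janeiro"), ("une", "Junho"), ("uly", "Julho")],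
--     "A": [("pril", "Abril"), ("ugust", "Agosto")],
--     "O": [("ctober", "Outubro")],
--     "N": [("ovember", "Novembro")],
--     "D": [("ecember", "Dezembro")],
-- }
--
--
-- def _translate_date_parts_to_ptbr(text: str) -> str:
--     out = []
--     i = 0
--     n = len(text)
--     while i < n:
--         hit = None
--         for rest, pt in _BY_FIRST.get(text[i], ()):
--             if text.startswith(rest, i + 1):
--                 hit = (rest, pt)
--                 break
--         if hit is None:
--             out.append(text[i])
--             i += 1
--         else:
--             out.append(hit[1])
--             i += 1 + len(hit[0])
--     return "".join(out)
-- ===== Notes on version B (the rewrite author's own statement) =====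
-- stated objective: alternative
-- what changed: Replaces the 19 sequential full-text str.replace passes with one explicit left-to-right index scan over the string that dispatches on the first letter through a precomputed bucket dict mapping each capital to its (rest-of-word, translation) candidates, so each position is examined once.
import Mathlib
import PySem

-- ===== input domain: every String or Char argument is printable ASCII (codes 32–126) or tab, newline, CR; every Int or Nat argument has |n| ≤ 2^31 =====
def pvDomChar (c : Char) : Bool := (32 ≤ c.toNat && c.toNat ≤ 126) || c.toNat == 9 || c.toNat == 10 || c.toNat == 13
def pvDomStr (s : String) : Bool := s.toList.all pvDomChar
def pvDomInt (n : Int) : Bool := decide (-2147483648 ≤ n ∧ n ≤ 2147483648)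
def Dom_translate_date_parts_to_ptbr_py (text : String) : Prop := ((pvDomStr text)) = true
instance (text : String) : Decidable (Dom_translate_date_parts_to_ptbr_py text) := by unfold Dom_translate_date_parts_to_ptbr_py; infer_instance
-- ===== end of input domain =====

-- B replaces A's 19 sequential full-text str.replace passes by ONE explicit left-to-right
-- index scan dispatching on the first letter through a precomputed bucket table; objective: alternative single pass.

-- ===== PORT A =====
-- the dict literal `replacements`, as an association list in insertion order
def pvReplacements : List (String × String) :=
  [("Monday", "Segunda-feira"), ("Tuesday", "Terça-feira"), ("Wednesday", "Quarta-feira"),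
   ("Thursday", "Quinta-feira"), ("Friday", "Sexta-feira"), ("Saturday", "Sábado"), ("Sunday", "Domingo"),
   ("January", "Janeiro"), ("February", "Fevereiro"), ("March", "Março"), ("April", "Abril"),
   ("May", "Maio"), ("June", "Junho"), ("July", "Julho"), ("August", "Agosto"),
   ("September", "Setembro"), ("October", "Outubro"), ("November", "Novembro"), ("December", "Dezembro")]

-- `for en, pt in replacements.items(): text = text.replace(en, pt)` (dict iteration = insertion order)
def translate_date_parts_to_ptbr_py (text : String) : String :=
  pvReplacements.foldl (fun t p => PySem.Str.replace t p.1 p.2) text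

-- ===== PORT B =====
-- B's module-level `_BY_FIRST` dict: first capital letter ↦ (rest-of-word, translation)
-- candidates, in Source B's literal insertion order
def pvBuckets (c : Char) : List (String × String) :=
  if c = 'M' then [("onday", "Segunda-feira"), ("arch", "Março"), ("ay", "Maio")]
  else if c = 'T' then [("uesday", "Terça-feira"), ("hursday", "Quinta-feira")]
  else if c = 'W' then [("ednesday", "Quarta-feira")]
  else if c = 'F' then [("riday", "Sexta-feira"), ("ebruary", "Fevereiro")]
  else if c = 'S' then [("aturday", "Sábado"), ("unday", "Domingo"), ("eptember", "Setembro")]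
  else if c = 'J' then [("anuary", "Janeiro"), ("une", "Junho"), ("uly", "Julho")]
  else if c = 'A' then [("pril", "Abril"), ("ugust", "Agosto")]
  else if c = 'O' then [("ctober", "Outubro")]
  else if c = 'N' then [("ovember", "Novembro")]
  else if c = 'D' then [("ecember", "Dezembro")]
  else []

-- Source B's while-loop over the index i: look at the current char, try its bucket's candidates
-- in order (`text.startswith(rest, i + 1)`), emit the translation and skip the word on a hit,
-- else copy the char and advance by one; ported as structural recursion on the remaining chars
def pvScanB (s : List Char) : List Char :=
  match s with
  | [] => []
  | c :: t =>
    match ((pvBuckets c).map (fun p => (p.1.toList, p.2.toList))).find?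
        (fun x => x.1.isPrefixOf t) with
    | some (k, v) => v ++ pvScanB (t.drop k.length)
    | none => c :: pvScanB t
termination_by s.length
decreasing_by
  · simp only [List.length_drop, List.length_cons]; omega
  · simp

def translate_date_parts_to_ptbr_py_alt (text : String) : String :=
  String.ofList (pvScanB text.toList)

-- ===== PRECONDITION & SPEC =====
def Spec_translate_date_parts_to_ptbr_py (text : String) (out : String) : Prop := out = translate_date_parts_to_ptbr_py_alt text
instance (text : String) (out : String) : Decidable (Spec_translate_date_parts_to_ptbr_py text out) := by unfold Spec_translate_date_parts_to_ptbr_py; infer_instance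

-- ===== CLAIM (what is proved, stated in full; the proofs are below) =====
def Claim_equal_translate_date_parts_to_ptbr_py : Prop := ∀ (text : String), Dom_translate_date_parts_to_ptbr_py text → Spec_translate_date_parts_to_ptbr_py text (translate_date_parts_to_ptbr_py text)

-- ===== LEMMAS AND PROOFS =====

-- proof-side view of the table on chars (full words)
def pvKeys : List (List Char × List Char) :=
  pvReplacements.map (fun p => (p.1.toList, p.2.toList))

-- proof-side intermediate scanner: first match over the FULL-WORD table at each position
def pvScan (s : List Char) : List Char :=
  match s with
  | [] => []
  | c :: t =>
    match pvKeys.find? (fun x => x.1.isPrefixOf (c :: t)) with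
    | some (k, v) => v ++ pvScan (t.drop (k.length - 1))
    | none => c :: pvScan t
termination_by s.length
decreasing_by
  · simp only [List.length_drop, List.length_cons]; omega
  · simp

-- a structural (fuel-free) version of one `str.replace` pass over chars
def rep1 (old new : List Char) (s : List Char) : List Char :=
  match s with
  | [] => []
  | c :: t =>
    if old.isPrefixOf (c :: t) then new ++ rep1 old new (t.drop (old.length - 1))
    else c :: rep1 old new t
termination_by s.length
decreasing_by
  · simp only [List.length_drop, List.length_cons]; omega
  · simp

-- sequential application of the replace passes, on chars
def appAll (ks : List (List Char × List Char)) (s : List Char) : List Char :=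
  ks.foldl (fun t p => rep1 p.1 p.2 t) s

-- "word shape": nonempty, first char an ASCII capital, no capital afterwards
def upC (c : Char) : Bool := 'A' ≤ c && c ≤ 'Z'
def headUp (l : List Char) : Bool :=
  match l with
  | [] => false
  | c :: t => upC c && t.all (fun x => !upC x)

-- the combinatorial facts about the 19 literal pairs, checked by kernel computation
lemma fact_key_shape : ∀ p ∈ pvKeys, headUp p.1 = true := by decide
lemma fact_val_shape : ∀ p ∈ pvKeys, headUp p.2 = true := by decide
lemma fact_key_val : ∀ p ∈ pvKeys, ∀ q ∈ pvKeys, ¬ p.1 <+: q.2 ∧ ¬ q.2 <+: p.1 := by decide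
lemma fact_key_key : ∀ p ∈ pvKeys, ∀ q ∈ pvKeys, p.1 ≠ q.1 → ¬ p.1 <+: q.1 := by decide
lemma fact_keys_ne_nil : ∀ p ∈ pvKeys, p.1 ≠ [] := by decide
lemma fact_heads : ∀ p ∈ pvKeys, p.1.head? ∈
    [some 'M', some 'T', some 'W', some 'F', some 'S',
     some 'J', some 'A', some 'O', some 'N', some 'D'] := by decide

lemma headUp_ne_nil {l : List Char} (h : headUp l = true) : l ≠ [] := by
  cases l <;> simp [headUp] at *

lemma heads_eq_of_prefix {a b : List Char} (h : a <+: b) (ha : a ≠ []) :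
    a.head? = b.head? := by
  obtain ⟨t, rfl⟩ := h
  cases a with
  | nil => exact absurd rfl ha
  | cons c a₀ => rfl

lemma prefix_append_cases {k a b : List Char} (h : k <+: a ++ b) : k <+: a ∨ a <+: k :=
  List.prefix_or_prefix_of_prefix h (List.prefix_append a b)

-- no word with a not-capital head is a prefix of one with a capital head (and conversely)
lemma head?_up_of_headUp {l : List Char} (h : headUp l = true) :
    ∃ c t, l = c :: t ∧ upC c = true ∧ ∀ x ∈ t, upC x = false := by
  cases l with
  | nil => simp [headUp] at h
  | cons c t =>
    simp only [headUp, Bool.and_eq_true, List.all_eq_true] at h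
    exact ⟨c, t, rfl, h.1, fun x hx => by simpa using h.2 x hx⟩

-- a key never matches strictly inside a headUp word (at positions 1 .. |w|-1), nor crossing out of it
lemma no_match_inside {k w X : List Char} (hk : headUp k = true) (hw : headUp w = true)
    {i : Nat} (hi0 : 0 < i) (hiw : i < w.length) : ¬ k <+: w.drop i ++ X := by
  obtain ⟨c, t, rfl, hc, ht⟩ := head?_up_of_headUp hw
  obtain ⟨ck, tk, rfl, hck, -⟩ := head?_up_of_headUp hk
  intro hp
  obtain ⟨j, rfl⟩ : ∃ j, i = j + 1 := ⟨i - 1, by omega⟩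
  have hlen : j < t.length := by simp at hiw; omega
  rw [List.drop_succ_cons, List.drop_eq_getElem_cons hlen] at hp
  have hhd : (ck :: tk).head? = ((t[j] :: t.drop (j + 1)) ++ X).head? :=
    heads_eq_of_prefix hp (by simp)
  simp only [List.cons_append, List.head?_cons, Option.some.injEq] at hhd
  have hfl : upC t[j] = false := ht _ (List.getElem_mem hlen)
  rw [← hhd, hck] at hfl
  exact absurd hfl (by simp)

-- a key never matches at position 0 of (value ++ X)
lemma no_match_val {k v X : List Char} (hkm : ∃ v', (k, v') ∈ pvKeys)
    (hvm : ∃ k', (k', v) ∈ pvKeys) : ¬ k <+: v ++ X := by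
  obtain ⟨v', hkm⟩ := hkm
  obtain ⟨k', hvm⟩ := hvm
  intro hp
  rcases prefix_append_cases hp with h | h
  · exact (fact_key_val _ hkm _ hvm).1 h
  · exact (fact_key_val _ hkm _ hvm).2 h

-- if a key matches nowhere in w (positions 0..|w|-1 of w ++ b), one pass walks over w
lemma skip (k v : List Char) : ∀ (a b : List Char),
    (∀ i, i < a.length → ¬ k <+: a.drop i ++ b) → rep1 k v (a ++ b) = a ++ rep1 k v b := by
  intro a
  induction a with
  | nil => intro b _; rfl
  | cons c a₀ ih =>
    intro b h
    have h0 : ¬ k.isPrefixOf (c :: (a₀ ++ b)) = true := by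
      rw [List.isPrefixOf_iff_prefix]
      simpa using h 0 (by simp)
    rw [List.cons_append, rep1, if_neg h0]
    simp only [List.cons_append, List.cons.injEq, true_and]
    exact ih b (fun i hi => by simpa using h (i + 1) (by simp; omega))

-- one pass walks over a whole headUp word, given only that it does not match at position 0
lemma skip_word {k v w X : List Char} (hk : headUp k = true) (hw : headUp w = true)
    (h0 : ¬ k <+: w ++ X) : rep1 k v (w ++ X) = w ++ rep1 k v X := by
  apply skip
  intro i hi
  cases Nat.eq_zero_or_pos i with
  | inl hz => subst hz; simpa using h0
  | inr hpos => exact no_match_inside hk hw hpos hi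

lemma key_shape_of_mem {k v : List Char} (h : (k, v) ∈ pvKeys) : headUp k = true :=
  fact_key_shape _ h
lemma val_shape_of_mem {k v : List Char} (h : (k, v) ∈ pvKeys) : headUp v = true :=
  fact_val_shape _ h

-- one pass walks over a value
lemma skip_val {k v : List Char} (hkv : (k, v) ∈ pvKeys) {k' v' : List Char}
    (hkv' : (k', v') ∈ pvKeys) (X : List Char) :
    rep1 k' v' (v ++ X) = v ++ rep1 k' v' X :=
  skip_word (key_shape_of_mem hkv') (val_shape_of_mem hkv)
    (no_match_val ⟨v', hkv'⟩ ⟨k, hkv⟩)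

-- all passes walk over a value
lemma pass_val : ∀ (ks : List (List Char × List Char)), (∀ x ∈ ks, x ∈ pvKeys) →
    ∀ {k v : List Char}, (k, v) ∈ pvKeys → ∀ X, appAll ks (v ++ X) = v ++ appAll ks X := by
  intro ks
  induction ks with
  | nil => intro _ k v _ X; rfl
  | cons p ks ih =>
    intro hsub k v hkv X
    have hp : p ∈ pvKeys := hsub p (by simp)
    obtain ⟨k₁, v₁⟩ := p
    show appAll ks (rep1 k₁ v₁ (v ++ X)) = v ++ appAll ks (rep1 k₁ v₁ X)
    rw [skip_val hkv hp]
    exact ih (fun x hx => hsub x (by simp [hx])) hkv _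

-- a matching key is consumed and replaced by its value
lemma rep_head {k v r : List Char} (hk : k ≠ []) : rep1 k v (k ++ r) = v ++ rep1 k v r := by
  obtain ⟨c, k₀, rfl⟩ := List.exists_cons_of_ne_nil hk
  rw [List.cons_append, rep1]
  have : (c :: k₀).isPrefixOf ((c :: k₀) ++ r) = true := by
    rw [List.isPrefixOf_iff_prefix]; exact List.prefix_append _ _
  rw [← List.cons_append, this]
  simp only [if_true, List.length_cons, Nat.add_sub_cancel]
  rw [List.drop_left]

-- whether a key matches at 0 of (k ++ X) does not depend on X, for k itself a key
lemma match_indep {q k : List Char} (hq : ∃ v, (q, v) ∈ pvKeys) (hk : ∃ v, (k, v) ∈ pvKeys)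
    (X Y : List Char) : q <+: k ++ X ↔ q <+: k ++ Y := by
  obtain ⟨vq, hq⟩ := hq
  obtain ⟨vk, hk⟩ := hk
  by_cases hqk : q = k
  · subst hqk
    constructor <;> intro _ <;> exact List.prefix_append _ _
  constructor <;> intro h <;>
  · rcases prefix_append_cases h with h' | h'
    · exact h'.trans (List.prefix_append _ _)
    · exact absurd h' (fact_key_key _ hk _ hq (fun e => hqk e.symm))

lemma find?_congr' {α : Type} (p q : α → Bool) : ∀ (l : List α),
    (∀ a ∈ l, p a = q a) → l.find? p = l.find? q := by
  intro l
  induction l with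
  | nil => intro _; rfl
  | cons a l ih =>
    intro h
    rw [List.find?_cons, List.find?_cons, h a (by simp)]
    cases q a
    · exact ih (fun x hx => h x (by simp [hx]))
    · rfl

-- the "value-headed" invariant: an already-processed tail is empty or starts with a value
def VH (Z : List Char) : Prop := Z = [] ∨ ∃ p ∈ pvKeys, ∃ W, Z = p.2 ++ W

-- one pass on (p ++ Z) keeps the shape: some prefix of p survives, the rest is value-headed
lemma pres {k v : List Char} (hkv : (k, v) ∈ pvKeys) : ∀ (p Z : List Char), VH Z →
    ∃ p' Z', rep1 k v (p ++ Z) = p' ++ Z' ∧ p' <+: p ∧ VH Z' := by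
  intro p
  induction p with
  | nil =>
    intro Z hZ
    rcases hZ with rfl | ⟨q, hq, W, rfl⟩
    · exact ⟨[], [], by simp [rep1], List.nil_prefix, Or.inl rfl⟩
    · refine ⟨[], q.2 ++ rep1 k v W, ?_, List.nil_prefix, Or.inr ⟨q, hq, _, rfl⟩⟩
      simpa using skip_val hq hkv W
  | cons c p₀ ih =>
    intro Z hZ
    by_cases h0 : k.isPrefixOf (c :: (p₀ ++ Z)) = true
    · refine ⟨[], v ++ rep1 k v ((p₀ ++ Z).drop (k.length - 1)), ?_, List.nil_prefix,
        Or.inr ⟨(k, v), hkv, _, rfl⟩⟩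
      rw [List.cons_append, rep1, if_pos h0]
      simp
    · obtain ⟨p', Z', he, hp, hv⟩ := ih Z hZ
      refine ⟨c :: p', Z', ?_, List.cons_prefix_cons.mpr ⟨rfl, hp⟩, hv⟩
      rw [List.cons_append, rep1, if_neg h0, he]
      simp

-- when no key matches at position 0 of c :: t, every pass keeps the head char
lemma nomatch_fold (c : Char) (t : List Char) :
    ∀ (ks : List (List Char × List Char)),
      (∀ x ∈ ks, x ∈ pvKeys ∧ ¬ x.1 <+: c :: t) →
      ∀ (p Z : List Char), p <+: t → VH Z →
      appAll ks (c :: (p ++ Z)) = c :: appAll ks (p ++ Z) := by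
  intro ks
  induction ks with
  | nil => intro _ p Z _ _; rfl
  | cons x ks ih =>
    intro h p Z hpt hZ
    obtain ⟨k, v⟩ := x
    obtain ⟨hmem, hnp⟩ := h (k, v) (by simp)
    obtain ⟨ck, tk, rfl, hck, htk⟩ := head?_up_of_headUp (key_shape_of_mem hmem)
    -- the key still does not match at the head of the current string
    have hno : ¬ (ck :: tk) <+: c :: (p ++ Z) := by
      intro hp
      obtain ⟨hc, htkp⟩ := List.cons_prefix_cons.mp hp
      rcases prefix_append_cases htkp with h1 | h1
      · exact hnp (List.cons_prefix_cons.mpr ⟨hc, h1.trans hpt⟩)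
      · obtain ⟨e, rfl⟩ := h1
        by_cases he : e = []
        · subst he
          exact hnp (List.cons_prefix_cons.mpr ⟨hc, by simpa using hpt⟩)
        · have heZ : e <+: Z := (List.prefix_append_right_inj p).mp htkp
          have heh : ∀ x ∈ e, upC x = false := fun x hx => htk x (by simp [hx])
          rcases hZ with rfl | ⟨q, hq, W, rfl⟩
          · exact he (List.prefix_nil.mp heZ)
          · obtain ⟨cq, tq, hq2, hcq, -⟩ := head?_up_of_headUp (val_shape_of_mem hq)
            rw [hq2] at heZ
            obtain ⟨ce, te, rfl⟩ := List.exists_cons_of_ne_nil he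
            have : ce = cq := by
              have := heads_eq_of_prefix heZ (by simp)
              simpa using this
            have hfalse : upC cq = false := this ▸ heh ce (by simp)
            rw [hcq] at hfalse
            exact absurd hfalse (by simp)
    have hstep : rep1 (ck :: tk) v (c :: (p ++ Z)) = c :: rep1 (ck :: tk) v (p ++ Z) := by
      rw [rep1, if_neg (by rw [List.isPrefixOf_iff_prefix]; exact hno)]
    obtain ⟨p', Z', he, hp', hv'⟩ := pres hmem p Z hZ
    show appAll ks (rep1 (ck :: tk) v (c :: (p ++ Z))) = c :: appAll ks (rep1 (ck :: tk) v (p ++ Z))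
    rw [hstep, he]
    exact ih (fun x hx => h x (by simp [hx])) p' Z' (hp'.trans hpt) hv'

-- core lemma for a match at position 0: all passes together rewrite k ++ r to v ++ (passes on r)
lemma lemb : ∀ (ks : List (List Char × List Char)), (∀ x ∈ ks, x ∈ pvKeys) →
    ∀ {k v : List Char}, (k, v) ∈ pvKeys → ∀ (r : List Char),
      ks.find? (fun x => x.1.isPrefixOf (k ++ r)) = some (k, v) →
      appAll ks (k ++ r) = v ++ appAll ks r := by
  intro ks
  induction ks with
  | nil => intro _ k v _ r h; simp at h
  | cons x ks ih =>
    intro hsub k v hkv r hfind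
    obtain ⟨k₁, v₁⟩ := x
    have hx : (k₁, v₁) ∈ pvKeys := hsub _ (by simp)
    by_cases hm : k₁.isPrefixOf (k ++ r) = true
    · simp only [List.find?_cons, hm] at hfind
      simp only [Option.some.injEq, Prod.mk.injEq] at hfind
      obtain ⟨rfl, rfl⟩ := hfind
      show appAll ks (rep1 k₁ v₁ (k₁ ++ r)) = v₁ ++ appAll ks (rep1 k₁ v₁ r)
      rw [rep_head (headUp_ne_nil (key_shape_of_mem hx))]
      exact pass_val ks (fun x hx' => hsub x (by simp [hx'])) hx _
    · simp only [List.find?_cons, Bool.of_not_eq_true hm] at hfind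
      -- the head key walks over k ++ r
      have hstep : rep1 k₁ v₁ (k ++ r) = k ++ rep1 k₁ v₁ r :=
        skip_word (key_shape_of_mem hx) (key_shape_of_mem hkv)
          (by rw [List.isPrefixOf_iff_prefix] at hm; exact hm)
      show appAll ks (rep1 k₁ v₁ (k ++ r)) = v ++ appAll ks (rep1 k₁ v₁ r)
      rw [hstep]
      refine ih (fun x hx' => hsub x (by simp [hx'])) hkv (rep1 k₁ v₁ r) ?_
      rw [← hfind]
      apply find?_congr'
      intro q hq
      have hqm : q ∈ pvKeys := hsub q (by simp [hq])
      have hiff := match_indep (q := q.1) (k := k) ⟨q.2, hqm⟩ ⟨v, hkv⟩ (rep1 k₁ v₁ r) r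
      show q.1.isPrefixOf (k ++ rep1 k₁ v₁ r) = q.1.isPrefixOf (k ++ r)
      rw [Bool.eq_iff_iff]
      simpa [List.isPrefixOf_iff_prefix] using hiff

lemma appAll_nil : ∀ (ks : List (List Char × List Char)), appAll ks [] = [] := by
  intro ks
  induction ks with
  | nil => rfl
  | cons x ks ih =>
    show appAll ks (rep1 x.1 x.2 []) = []
    rw [show rep1 x.1 x.2 [] = [] from by rw [rep1]]
    exact ih

-- MAIN part 1: the 19 sequential passes equal the full-word single scan
lemma main_eq : ∀ (n : Nat) (s : List Char), s.length ≤ n → appAll pvKeys s = pvScan s := by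
  intro n
  induction n with
  | zero =>
    intro s hs
    have : s = [] := List.eq_nil_of_length_eq_zero (by omega)
    subst this
    rw [appAll_nil, pvScan]
  | succ n ih =>
    intro s hs
    cases s with
    | nil => rw [appAll_nil, pvScan]
    | cons c t =>
      rw [pvScan]
      cases hfind : pvKeys.find? (fun x => x.1.isPrefixOf (c :: t)) with
      | none =>
        have hall : ∀ x ∈ pvKeys, x ∈ pvKeys ∧ ¬ x.1 <+: c :: t := by
          intro x hx
          refine ⟨hx, ?_⟩
          have := List.find?_eq_none.mp hfind x hx
          rw [List.isPrefixOf_iff_prefix] at this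
          simpa using this
        have h1 : appAll pvKeys (c :: t) = c :: appAll pvKeys t := by
          have := nomatch_fold c t pvKeys hall t [] List.prefix_rfl (Or.inl rfl)
          simpa using this
        rw [h1, ih t (by simp at hs; omega)]
      | some p =>
        obtain ⟨k, v⟩ := p
        have hmem : (k, v) ∈ pvKeys := List.mem_of_find?_eq_some hfind
        have hpre : k <+: c :: t := by
          have := List.find?_some hfind
          rw [List.isPrefixOf_iff_prefix] at this
          simpa using this
        obtain ⟨ck, k₀, rfl⟩ := List.exists_cons_of_ne_nil (headUp_ne_nil (key_shape_of_mem hmem))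
        obtain ⟨r, hr⟩ := hpre
        rw [List.cons_append] at hr
        injection hr with hc ht
        subst hc
        subst ht
        have hdrop : (k₀ ++ r).drop ((ck :: k₀).length - 1) = r := by
          simp only [List.length_cons, Nat.add_sub_cancel]
          exact List.drop_left
        have hrlen : r.length ≤ n := by
          simp at hs; omega
        have hlhs : appAll pvKeys (ck :: (k₀ ++ r)) = v ++ pvScan r := by
          rw [← List.cons_append,
            lemb pvKeys (fun x hx => hx) hmem r
              (by rw [← List.cons_append] at hfind; exact hfind),
            ih r hrlen]
        rw [hlhs]
        show v ++ pvScan r = v ++ pvScan (List.drop ((ck :: k₀).length - 1) (k₀ ++ r))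
        rw [hdrop]

-- generic: first match over full words at c :: t = mapped first match over the
-- rest-of-word restriction of the table to first char c
lemma find?_head_split (c : Char) (t : List Char) :
    ∀ (l : List (List Char × List Char)), (∀ p ∈ l, p.1 ≠ []) →
      l.find? (fun x => x.1.isPrefixOf (c :: t)) =
        Option.map (fun p => (c :: p.1, p.2))
          ((l.filterMap (fun x =>
              match x.1 with
              | [] => none
              | c' :: k' => if c' = c then some (k', x.2) else none)).find?
            (fun x => x.1.isPrefixOf t)) := by
  intro l
  induction l with
  | nil => intro _; rfl
  | cons x l ih =>
    intro h
    obtain ⟨k, v⟩ := x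
    cases k with
    | nil => exact absurd rfl (h ([], v) (by simp))
    | cons c' k' =>
      have hrest : ∀ p ∈ l, p.1 ≠ [] := fun p hp => h p (by simp [hp])
      by_cases hc : c' = c
      · subst hc
        simp only [List.find?_cons, List.filterMap_cons, List.isPrefixOf, beq_self_eq_true,
          Bool.true_and, if_true]
        cases hk : k'.isPrefixOf t with
        | false =>
          exact ih hrest
        | true =>
          simp only [Option.map_some]
      · have hfalse : (c' :: k').isPrefixOf (c :: t) = false := by
          simp [List.isPrefixOf, hc]
        simp only [List.find?_cons, hfalse, List.filterMap_cons, if_neg hc]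
        exact ih hrest

-- the restriction of the full-word table to first char c is exactly B's bucket
lemma buckets_eq (c : Char) :
    pvKeys.filterMap (fun x =>
        match x.1 with
        | [] => none
        | c' :: k' => if c' = c then some (k', x.2) else none) =
      (pvBuckets c).map (fun p => (p.1.toList, p.2.toList)) := by
  by_cases h1 : c = 'M'
  · subst h1; decide
  by_cases h2 : c = 'T'
  · subst h2; decide
  by_cases h3 : c = 'W'
  · subst h3; decide
  by_cases h4 : c = 'F'
  · subst h4; decide
  by_cases h5 : c = 'S'
  · subst h5; decide
  by_cases h6 : c = 'J'
  · subst h6; decide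
  by_cases h7 : c = 'A'
  · subst h7; decide
  by_cases h8 : c = 'O'
  · subst h8; decide
  by_cases h9 : c = 'N'
  · subst h9; decide
  by_cases h10 : c = 'D'
  · subst h10; decide
  have hnil : pvBuckets c = [] := by
    simp [pvBuckets, h1, h2, h3, h4, h5, h6, h7, h8, h9, h10]
  rw [hnil, List.map_nil, List.filterMap_eq_nil_iff]
  intro x hx
  have hh := fact_heads x hx
  cases hk : x.1 with
  | nil => exact absurd hk (fact_keys_ne_nil x hx)
  | cons c' k' =>
    rw [hk] at hh
    simp only [List.head?_cons, List.mem_cons, Option.some.injEq, List.not_mem_nil,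
      or_false] at hh
    have hne : ¬ c' = c := by
      intro he
      subst he
      rcases hh with rfl | rfl | rfl | rfl | rfl | rfl | rfl | rfl | rfl | rfl
      · exact h1 rfl
      · exact h2 rfl
      · exact h3 rfl
      · exact h4 rfl
      · exact h5 rfl
      · exact h6 rfl
      · exact h7 rfl
      · exact h8 rfl
      · exact h9 rfl
      · exact h10 rfl
    simp only [if_neg hne]

-- MAIN part 2: the full-word scan equals B's bucketed scan
lemma scanB_eq : ∀ (n : Nat) (s : List Char), s.length ≤ n → pvScan s = pvScanB s := by
  intro n
  induction n with
  | zero =>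
    intro s hs
    have : s = [] := List.eq_nil_of_length_eq_zero (by omega)
    subst this
    rw [pvScan, pvScanB]
  | succ n ih =>
    intro s hs
    cases s with
    | nil => rw [pvScan, pvScanB]
    | cons c t =>
      rw [pvScan, pvScanB, find?_head_split c t pvKeys fact_keys_ne_nil, buckets_eq c]
      cases hf : ((pvBuckets c).map (fun p => (p.1.toList, p.2.toList))).find?
          (fun x => x.1.isPrefixOf t) with
      | none =>
        simp only [Option.map_none]
        rw [ih t (by simp at hs; omega)]
      | some p =>
        obtain ⟨k, v⟩ := p
        simp only [Option.map_some, List.length_cons, Nat.add_sub_cancel]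
        rw [ih (t.drop k.length) (by simp only [List.length_drop]; simp at hs; omega)]

-- bridge: PySem's fueled replace equals rep1
lemma go_spec (old new : List Char) (hold : old ≠ []) :
    ∀ (fuel : Nat) (l acc : List Char), l.length ≤ fuel →
      PySem.Chars.replace.go old new fuel l acc = acc.reverse ++ rep1 old new l := by
  intro fuel
  induction fuel with
  | zero =>
    intro l acc hl
    have : l = [] := List.eq_nil_of_length_eq_zero (by omega)
    subst this
    rw [PySem.Chars.replace.go, rep1]
  | succ fuel ihf =>
    intro l acc hl
    cases l with
    | nil =>
      simp [PySem.Chars.replace.go, rep1]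
    | cons c t =>
      obtain ⟨d, old₀, rfl⟩ := List.exists_cons_of_ne_nil hold
      rw [PySem.Chars.replace.go, rep1]
      by_cases hm : (d :: old₀).isPrefixOf (c :: t) = true
      · rw [if_pos hm, if_pos hm]
        have hlen : (List.drop (d :: old₀).length (c :: t)).length ≤ fuel := by
          simp only [List.length_drop, List.length_cons] at *
          omega
        rw [ihf _ _ hlen]
        simp only [List.length_cons, Nat.add_sub_cancel, List.drop_succ_cons,
          List.reverse_append, List.reverse_reverse, List.append_assoc]
      · rw [if_neg hm, if_neg hm]
        have hlen : t.length ≤ fuel := by simp at hl; omega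
        rw [ihf _ _ hlen]
        simp

lemma replace_eq_rep1 (s old new : List Char) (h : old ≠ []) :
    PySem.Chars.replace s old new = rep1 old new s := by
  rw [PySem.Chars.replace]
  rw [if_neg (by simpa [List.isEmpty_iff] using h)]
  simpa using go_spec old new h s.length s [] le_rfl

-- A's string-level foldl, moved to chars
lemma foldl_toList : ∀ (ps : List (String × String)) (s : String),
    (ps.foldl (fun t p => PySem.Str.replace t p.1 p.2) s).toList =
      (ps.map (fun p => (p.1.toList, p.2.toList))).foldl
        (fun t p => PySem.Chars.replace t p.1 p.2) s.toList := by
  intro ps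
  induction ps with
  | nil => intro s; rfl
  | cons p ps ih =>
    intro s
    simp only [List.foldl_cons, List.map_cons]
    rw [ih, PySem.Str.toList_replace]

lemma foldl_replace_eq_appAll : ∀ (ks : List (List Char × List Char)), (∀ p ∈ ks, p.1 ≠ []) →
    ∀ (l : List Char),
      ks.foldl (fun t p => PySem.Chars.replace t p.1 p.2) l = appAll ks l := by
  intro ks
  induction ks with
  | nil => intro _ _; rfl
  | cons p ks ih =>
    intro h l
    show ks.foldl _ (PySem.Chars.replace l p.1 p.2) = appAll ks (rep1 p.1 p.2 l)
    rw [replace_eq_rep1 l p.1 p.2 (h p (by simp))]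
    exact ih (fun q hq => h q (by simp [hq])) _

-- ===== VERDICT (by name: the statement is the Claim_ definition above) =====
theorem translate_date_parts_to_ptbr_py_spec : Claim_equal_translate_date_parts_to_ptbr_py := by
  intro text _
  show translate_date_parts_to_ptbr_py text = translate_date_parts_to_ptbr_py_alt text
  have h1 : (translate_date_parts_to_ptbr_py text).toList = pvScanB text.toList := by
    rw [translate_date_parts_to_ptbr_py, foldl_toList]
    show (pvKeys.foldl _ text.toList) = _
    rw [foldl_replace_eq_appAll pvKeys fact_keys_ne_nil,
      main_eq text.toList.length text.toList le_rfl,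
      scanB_eq text.toList.length text.toList le_rfl]
  rw [translate_date_parts_to_ptbr_py_alt, ← h1, String.ofList_toList]
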